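-- pv_equiv track=rewrite | github.com/nicolaavogel/taxon_comparisons | taxon_compare.py | build_buckets_for_sets
-- ===== SOURCE A (Python) =====
-- from typing import Dict, Optional, Set, Tuple, List
--
-- def normalize_name(s: str) -> str:
--     return " ".join(s.strip().split()).lower()
--
-- def build_buckets_for_sets(gbif_list: List[str], ncbi_list: List[str], local_list: List[str]) -> dict:
--     gbif = {normalize_name(x) for x in (gbif_list or []) if str(x).strip()}
--     ncbi = {normalize_name(x) for x in (ncbi_list or []) if str(x).strip()}
--     local = {normalize_name(x) for x in (local_list or []) if str(x).strip()}
--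
--     return {
--         "ALL_3": gbif & ncbi & local,
--         "GBIF_NCBI": (gbif & ncbi) - local,
--         "GBIF_LOCAL": (gbif & local) - ncbi,
--         "NCBI_LOCAL": (ncbi & local) - gbif,
--         "GBIF_ONLY": gbif - ncbi - local,
--         "NCBI_ONLY": ncbi - gbif - local,
--         "LOCAL_ONLY": local - gbif - ncbi,
--     }
-- ===== SOURCE B (Python) =====
-- def normalize_name(s: str) -> str:
--     return " ".join(s.strip().split()).lower()
--
--
-- _KEYS = ("ALL_3", "GBIF_NCBI", "GBIF_LOCAL", "NCBI_LOCAL",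
--          "GBIF_ONLY", "NCBI_ONLY", "LOCAL_ONLY")
--
-- _TABLE = {
--     (True, True, True): "ALL_3",
--     (True, True, False): "GBIF_NCBI",
--     (True, False, True): "GBIF_LOCAL",
--     (False, True, True): "NCBI_LOCAL",
--     (True, False, False): "GBIF_ONLY",
--     (False, True, False): "NCBI_ONLY",
--     (False, False, True): "LOCAL_ONLY",
-- }
--
--
-- def build_buckets_for_sets(gbif_list, ncbi_list, local_list):
--     seen = set()
--     union = []  # every distinct normalized name, in first-seen order
--
--     def collect(lst):
--         s = set()
--         for x in (lst or []):
--             if str(x).strip():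
--                 m = normalize_name(x)
--                 if m not in seen:
--                     seen.add(m)
--                     union.append(m)
--                 s.add(m)
--         return s
--
--     gbif = collect(gbif_list)
--     ncbi = collect(ncbi_list)
--     loc = collect(local_list)
--
--     buckets = {k: set() for k in _KEYS}
--     for m in union:
--         buckets[_TABLE[(m in gbif, m in ncbi, m in loc)]].add(m)
--     return buckets
-- ===== Notes on version B (the rewrite author's own statement) =====
-- stated objective: alternative
-- what changed: A builds each of the seven buckets by a separate chain of set intersections/differences; B collects the three normalized sets plus a deduplicated union list in one ingestion pass and then routes each union member into its single bucket by its membership triple via a lookup table.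
import Mathlib
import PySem

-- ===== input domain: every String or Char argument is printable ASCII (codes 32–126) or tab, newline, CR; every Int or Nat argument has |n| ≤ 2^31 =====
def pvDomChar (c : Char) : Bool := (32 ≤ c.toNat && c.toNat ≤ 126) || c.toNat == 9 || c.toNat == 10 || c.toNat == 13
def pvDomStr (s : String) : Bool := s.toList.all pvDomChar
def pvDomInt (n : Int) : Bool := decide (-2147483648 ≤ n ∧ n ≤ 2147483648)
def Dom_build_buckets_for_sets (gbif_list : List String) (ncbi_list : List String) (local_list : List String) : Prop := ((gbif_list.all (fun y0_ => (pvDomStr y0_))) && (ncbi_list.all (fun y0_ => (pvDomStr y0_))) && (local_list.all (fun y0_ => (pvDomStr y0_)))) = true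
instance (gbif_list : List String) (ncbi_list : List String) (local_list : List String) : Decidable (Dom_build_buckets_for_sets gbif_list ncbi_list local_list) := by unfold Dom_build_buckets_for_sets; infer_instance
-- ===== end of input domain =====

-- B replaces A's seven set-algebra expressions by a single routing pass over a deduplicated
-- union list (alternative decomposition; same exact result).

-- ===== PORT A =====
-- normalize_name(s) = " ".join(s.strip().split()).lower()
def pvNormalize (s : String) : String :=
  PySem.Str.lower (PySem.Str.join " " (PySem.Str.split₀ (PySem.Str.strip s)))

-- {normalize_name(x) for x in (lst or []) if str(x).strip()}   ((lst or []) = lst for a list value;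
-- x is already a str so str(x) = x; truthiness of a string = being nonempty)
def pvNormSet (lst : List String) : PySem.Set String :=
  PySem.Set.ofList ((lst.filter (fun x => !(PySem.Str.strip x == ""))).map pvNormalize)

def build_buckets_for_sets (gbif_list : List String) (ncbi_list : List String) (local_list : List String) : List (String × List String) :=
  let gbif := pvNormSet gbif_list
  let ncbi := pvNormSet ncbi_list
  let lokal := pvNormSet local_list
  [("ALL_3", PySem.Set.inter (PySem.Set.inter gbif ncbi) lokal),
   ("GBIF_NCBI", PySem.Set.diff (PySem.Set.inter gbif ncbi) lokal),
   ("GBIF_LOCAL", PySem.Set.diff (PySem.Set.inter gbif lokal) ncbi),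
   ("NCBI_LOCAL", PySem.Set.diff (PySem.Set.inter ncbi lokal) gbif),
   ("GBIF_ONLY", PySem.Set.diff (PySem.Set.diff gbif ncbi) lokal),
   ("NCBI_ONLY", PySem.Set.diff (PySem.Set.diff ncbi gbif) lokal),
   ("LOCAL_ONLY", PySem.Set.diff (PySem.Set.diff lokal gbif) ncbi)]

-- ===== PORT B =====
-- loop body of B's collect(): state is (s, seen, union)
def pvStep (acc : PySem.Set String × PySem.Set String × List String) (x : String) :
    PySem.Set String × PySem.Set String × List String :=
  if PySem.Str.strip x == "" then acc
  else
    let m := pvNormalize x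
    if PySem.Set.contains acc.2.1 m then (PySem.Set.add acc.1 m, acc.2.1, acc.2.2)
    else (PySem.Set.add acc.1 m, PySem.Set.add acc.2.1 m, acc.2.2 ++ [m])

-- collect(lst) : returns (s, seen, union) — seen/union are B's outer accumulators
def pvCollect (lst : List String) (seen : PySem.Set String) (union : List String) :
    PySem.Set String × PySem.Set String × List String :=
  lst.foldl pvStep (PySem.Set.empty, seen, union)

-- _TABLE
def pvTable : PySem.Dict (Bool × Bool × Bool) String :=
  PySem.Dict.ofList
    [((true, true, true), "ALL_3"), ((true, true, false), "GBIF_NCBI"),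
     ((true, false, true), "GBIF_LOCAL"), ((false, true, true), "NCBI_LOCAL"),
     ((true, false, false), "GBIF_ONLY"), ((false, true, false), "NCBI_ONLY"),
     ((false, false, true), "LOCAL_ONLY")]

-- {k: set() for k in _KEYS}
def pvBuckets0 : PySem.Dict String (List String) :=
  PySem.Dict.ofList
    [("ALL_3", []), ("GBIF_NCBI", []), ("GBIF_LOCAL", []), ("NCBI_LOCAL", []),
     ("GBIF_ONLY", []), ("NCBI_ONLY", []), ("LOCAL_ONLY", [])]

def build_buckets_for_sets_alt (gbif_list : List String) (ncbi_list : List String) (local_list : List String) : List (String × List String) :=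
  let r1 := pvCollect gbif_list PySem.Set.empty []
  let r2 := pvCollect ncbi_list r1.2.1 r1.2.2
  let r3 := pvCollect local_list r2.2.1 r2.2.2
  -- for m in union: buckets[_TABLE[(m in gbif, m in ncbi, m in loc)]].add(m)
  -- (_TABLE[t] cannot raise KeyError: every union member is in at least one of the three sets,
  --  so the (False,False,False) key is never looked up; .getD "" supplies that unreachable branch)
  let buckets := r3.2.2.foldl (fun d m =>
      PySem.Dict.modify d
        ((PySem.Dict.get? pvTable
            (PySem.Set.contains r1.1 m, PySem.Set.contains r2.1 m, PySem.Set.contains r3.1 m)).getD "")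
        [] (fun s => PySem.Set.add s m)) pvBuckets0
  buckets.items

-- ===== PRECONDITION & SPEC =====
def Spec_build_buckets_for_sets (gbif_list : List String) (ncbi_list : List String) (local_list : List String) (out : List (String × List String)) : Prop := out = build_buckets_for_sets_alt gbif_list ncbi_list local_list
instance (gbif_list : List String) (ncbi_list : List String) (local_list : List String) (out : List (String × List String)) : Decidable (Spec_build_buckets_for_sets gbif_list ncbi_list local_list out) := by unfold Spec_build_buckets_for_sets; infer_instance

-- ===== CLAIM (what is proved, stated in full; the proofs are below) =====
def Claim_equal_build_buckets_for_sets : Prop := ∀ (gbif_list : List String) (ncbi_list : List String) (local_list : List String), Dom_build_buckets_for_sets gbif_list ncbi_list local_list → Spec_build_buckets_for_sets gbif_list ncbi_list local_list (build_buckets_for_sets gbif_list ncbi_list local_list)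

-- ===== LEMMAS AND PROOFS =====

-- the normalized, blank-filtered name list of an input list (in input order, with duplicates)
def pvNormList (lst : List String) : List String :=
  (lst.filter (fun x => !(PySem.Str.strip x == ""))).map pvNormalize

lemma pvStep_fold (lst : List String) : ∀ (s u : PySem.Set String),
    List.foldl pvStep (s, u, u) lst =
      (PySem.Set.update s (pvNormList lst), PySem.Set.update u (pvNormList lst),
        PySem.Set.update u (pvNormList lst)) := by
  induction lst with
  | nil => intro s u; simp [pvNormList, PySem.Set.update]
  | cons x t ih =>
    intro s u
    by_cases hb : (PySem.Str.strip x == "") = true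
    · have hnl : pvNormList (x :: t) = pvNormList t := by
        simp [pvNormList, hb]
      rw [List.foldl_cons, hnl]
      have hstep : pvStep (s, u, u) x = (s, u, u) := by simp [pvStep, hb]
      rw [hstep, ih]
    · have hnl : pvNormList (x :: t) = pvNormalize x :: pvNormList t := by
        simp [pvNormList, hb]
      rw [List.foldl_cons, hnl]
      simp only [PySem.Set.update_cons]
      by_cases hc : PySem.Set.contains u (pvNormalize x) = true
      · have hmem : pvNormalize x ∈ u := (PySem.Set.contains_iff u (pvNormalize x)).1 hc
        have hstep : pvStep (s, u, u) x = (PySem.Set.add s (pvNormalize x), u, u) := by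
          simp [pvStep, hb, hmem]
        rw [hstep, ih, PySem.Set.add_of_mem hmem]
      · have hmem : pvNormalize x ∉ u := fun h => hc ((PySem.Set.contains_iff u (pvNormalize x)).2 h)
        have hstep : pvStep (s, u, u) x =
            (PySem.Set.add s (pvNormalize x), PySem.Set.add u (pvNormalize x),
              u ++ [pvNormalize x]) := by
          simp [pvStep, hb, hmem]
        rw [hstep, ← PySem.Set.add_of_not_mem hmem, ih]

lemma pvCollect_spec (lst : List String) (u : PySem.Set String) :
    pvCollect lst u u =
      (PySem.Set.ofList (pvNormList lst), PySem.Set.update u (pvNormList lst),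
        PySem.Set.update u (pvNormList lst)) := by
  show List.foldl pvStep (PySem.Set.empty, u, u) lst = _
  rw [show (PySem.Set.empty : PySem.Set String) = [] from rfl, pvStep_fold,
    PySem.Set.update_nil_left]

-- the seven-bucket dict, values exposed
def pvMkD (a1 a2 a3 a4 a5 a6 a7 : List String) : PySem.Dict String (List String) :=
  PySem.Dict.mk
    [("ALL_3", a1), ("GBIF_NCBI", a2), ("GBIF_LOCAL", a3), ("NCBI_LOCAL", a4),
     ("GBIF_ONLY", a5), ("NCBI_ONLY", a6), ("LOCAL_ONLY", a7)]

-- one bucket of the routing fold, in isolation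
def pvG (g n l : PySem.Set String) (t1 t2 t3 : Bool) (u : List String) (a : PySem.Set String) :
    PySem.Set String :=
  u.foldl (fun s m =>
    if PySem.Set.contains g m == t1 && (PySem.Set.contains n m == t2) &&
        (PySem.Set.contains l m == t3) then PySem.Set.add s m else s) a

lemma pvDictFold (g n l : PySem.Set String) :
    ∀ (u : List String), (∀ m ∈ u, m ∈ g ∨ m ∈ n ∨ m ∈ l) →
    ∀ a1 a2 a3 a4 a5 a6 a7,
    u.foldl (fun d m =>
        PySem.Dict.modify d
          ((PySem.Dict.get? pvTable
              (PySem.Set.contains g m, PySem.Set.contains n m, PySem.Set.contains l m)).getD "")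
          [] (fun s => PySem.Set.add s m)) (pvMkD a1 a2 a3 a4 a5 a6 a7)
      = pvMkD (pvG g n l true true true u a1) (pvG g n l true true false u a2)
          (pvG g n l true false true u a3) (pvG g n l false true true u a4)
          (pvG g n l true false false u a5) (pvG g n l false true false u a6)
          (pvG g n l false false true u a7) := by
  intro u
  induction u with
  | nil => intro _ a1 a2 a3 a4 a5 a6 a7; simp [pvG]
  | cons m t ih =>
    intro h a1 a2 a3 a4 a5 a6 a7
    have hm := h m (List.mem_cons_self ..)
    have ht : ∀ x ∈ t, x ∈ g ∨ x ∈ n ∨ x ∈ l := fun x hx => h x (List.mem_cons_of_mem _ hx)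
    cases hg : PySem.Set.contains g m <;> cases hn : PySem.Set.contains n m <;>
      cases hl : PySem.Set.contains l m
    case false.false.false =>
      exfalso
      rcases hm with h' | h' | h'
      · have h2 := (PySem.Set.contains_iff g m).2 h'; rw [hg] at h2; simp at h2
      · have h2 := (PySem.Set.contains_iff n m).2 h'; rw [hn] at h2; simp at h2
      · have h2 := (PySem.Set.contains_iff l m).2 h'; rw [hl] at h2; simp at h2
    case true.true.true =>
      simp only [List.foldl_cons]
      rw [hg, hn, hl]
      rw [show PySem.Dict.modify (pvMkD a1 a2 a3 a4 a5 a6 a7)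
            ((PySem.Dict.get? pvTable (true, true, true)).getD "") []
            (fun s => PySem.Set.add s m) = pvMkD (PySem.Set.add a1 m) a2 a3 a4 a5 a6 a7 from rfl]
      rw [ih ht]
      simp only [pvG, List.foldl_cons, hg, hn, hl]
      simp
    case true.true.false =>
      simp only [List.foldl_cons]
      rw [hg, hn, hl]
      rw [show PySem.Dict.modify (pvMkD a1 a2 a3 a4 a5 a6 a7)
            ((PySem.Dict.get? pvTable (true, true, false)).getD "") []
            (fun s => PySem.Set.add s m) = pvMkD a1 (PySem.Set.add a2 m) a3 a4 a5 a6 a7 from rfl]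
      rw [ih ht]
      simp only [pvG, List.foldl_cons, hg, hn, hl]
      simp
    case true.false.true =>
      simp only [List.foldl_cons]
      rw [hg, hn, hl]
      rw [show PySem.Dict.modify (pvMkD a1 a2 a3 a4 a5 a6 a7)
            ((PySem.Dict.get? pvTable (true, false, true)).getD "") []
            (fun s => PySem.Set.add s m) = pvMkD a1 a2 (PySem.Set.add a3 m) a4 a5 a6 a7 from rfl]
      rw [ih ht]
      simp only [pvG, List.foldl_cons, hg, hn, hl]
      simp
    case false.true.true =>
      simp only [List.foldl_cons]
      rw [hg, hn, hl]
      rw [show PySem.Dict.modify (pvMkD a1 a2 a3 a4 a5 a6 a7)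
            ((PySem.Dict.get? pvTable (false, true, true)).getD "") []
            (fun s => PySem.Set.add s m) = pvMkD a1 a2 a3 (PySem.Set.add a4 m) a5 a6 a7 from rfl]
      rw [ih ht]
      simp only [pvG, List.foldl_cons, hg, hn, hl]
      simp
    case true.false.false =>
      simp only [List.foldl_cons]
      rw [hg, hn, hl]
      rw [show PySem.Dict.modify (pvMkD a1 a2 a3 a4 a5 a6 a7)
            ((PySem.Dict.get? pvTable (true, false, false)).getD "") []
            (fun s => PySem.Set.add s m) = pvMkD a1 a2 a3 a4 (PySem.Set.add a5 m) a6 a7 from rfl]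
      rw [ih ht]
      simp only [pvG, List.foldl_cons, hg, hn, hl]
      simp
    case false.true.false =>
      simp only [List.foldl_cons]
      rw [hg, hn, hl]
      rw [show PySem.Dict.modify (pvMkD a1 a2 a3 a4 a5 a6 a7)
            ((PySem.Dict.get? pvTable (false, true, false)).getD "") []
            (fun s => PySem.Set.add s m) = pvMkD a1 a2 a3 a4 a5 (PySem.Set.add a6 m) a7 from rfl]
      rw [ih ht]
      simp only [pvG, List.foldl_cons, hg, hn, hl]
      simp
    case false.false.true =>
      simp only [List.foldl_cons]
      rw [hg, hn, hl]
      rw [show PySem.Dict.modify (pvMkD a1 a2 a3 a4 a5 a6 a7)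
            ((PySem.Dict.get? pvTable (false, false, true)).getD "") []
            (fun s => PySem.Set.add s m) = pvMkD a1 a2 a3 a4 a5 a6 (PySem.Set.add a7 m) from rfl]
      rw [ih ht]
      simp only [pvG, List.foldl_cons, hg, hn, hl]
      simp


lemma pvG_eq_filter (g n l : PySem.Set String) (t1 t2 t3 : Bool) :
    ∀ (u : List String) (a : PySem.Set String), u.Nodup → (∀ x ∈ u, x ∉ a) →
    pvG g n l t1 t2 t3 u a =
      a ++ u.filter (fun m => PySem.Set.contains g m == t1 &&
        (PySem.Set.contains n m == t2) && (PySem.Set.contains l m == t3)) := by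
  intro u
  induction u with
  | nil => intro a _ _; simp [pvG]
  | cons m t ih =>
    intro a hnd hd
    have hndt : t.Nodup := hnd.of_cons
    have hm : m ∉ t := by
      intro hmt; exact (List.nodup_cons.1 hnd).1 hmt
    by_cases hp : (PySem.Set.contains g m == t1 && (PySem.Set.contains n m == t2) &&
        (PySem.Set.contains l m == t3)) = true
    · have hstep : pvG g n l t1 t2 t3 (m :: t) a = pvG g n l t1 t2 t3 t (a ++ [m]) := by
        simp only [pvG, List.foldl_cons, hp, if_true]
        rw [PySem.Set.add_of_not_mem (hd m (List.mem_cons_self ..))]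
      rw [hstep, ih (a ++ [m]) hndt ?hdisj, List.filter_cons_of_pos (by simpa using hp)]
      · simp
      case hdisj =>
        intro x hx hmem
        rcases List.mem_append.1 hmem with h' | h'
        · exact hd x (List.mem_cons_of_mem _ hx) h'
        · have : x = m := by simpa using h'
          exact hm (this ▸ hx)
    · have hstep : pvG g n l t1 t2 t3 (m :: t) a = pvG g n l t1 t2 t3 t a := by
        simp only [pvG, List.foldl_cons]
        rw [if_neg hp]
      rw [hstep, ih a hndt (fun x hx => hd x (List.mem_cons_of_mem _ hx)),
        List.filter_cons_of_neg (by simpa using hp)]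

lemma pvFilter_nil {p : String → Bool} (xs : List String) (h : ∀ m ∈ xs, p m = false) :
    xs.filter p = [] :=
  List.filter_eq_nil_iff.mpr (by intro a ha hpa; rw [h a ha] at hpa; exact Bool.noConfusion hpa)


lemma pvCombine1 {b c a d : List String} (hb : b = []) (hc : c = []) (had : a = d) :
    d = a ++ b ++ c := by subst hb; subst hc; subst had; simp

lemma pvCombine2 {a c b d : List String} (ha : a = []) (hc : c = []) (hbd : b = d) :
    d = a ++ b ++ c := by subst ha; subst hc; subst hbd; simp

lemma pvCombine3 {a b c d : List String} (ha : a = []) (hb : b = []) (hcd : c = d) :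
    d = a ++ b ++ c := by subst ha; subst hb; subst hcd; simp

lemma pvUNodup (G N L : List String) :
    (PySem.Set.update (PySem.Set.update (PySem.Set.ofList G) N) L).Nodup :=
  PySem.Set.nodup_update _ _ (PySem.Set.nodup_update _ _ (PySem.Set.nodup_ofList G))

lemma pvB1 (G N L : List String) :
    PySem.Set.inter (PySem.Set.inter (PySem.Set.ofList G) (PySem.Set.ofList N)) (PySem.Set.ofList L)
      = pvG (PySem.Set.ofList G) (PySem.Set.ofList N) (PySem.Set.ofList L) true true true
          (PySem.Set.update (PySem.Set.update (PySem.Set.ofList G) N) L) [] := by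
  rw [pvG_eq_filter _ _ _ _ _ _ _ [] (pvUNodup G N L) (by simp), List.nil_append,
    PySem.Set.update_eq_append_filter (PySem.Set.update (PySem.Set.ofList G) N) L,
    PySem.Set.update_eq_append_filter (PySem.Set.ofList G) N, List.filter_append,
    List.filter_append]
  simp only [PySem.Set.inter, PySem.Set.diff]
  refine pvCombine1 ?_ ?_ ?_
  · rw [List.filter_filter]
    refine pvFilter_nil _ ?_
    intro m hm
    by_cases h1 : m ∈ PySem.Set.ofList G <;> by_cases h2 : m ∈ PySem.Set.ofList N <;>
      by_cases h3 : m ∈ PySem.Set.ofList L <;>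
      simp_all [List.contains_eq_mem, PySem.Set.contains_eq_listContains, List.mem_filter,
        List.mem_append]
  · rw [List.filter_filter]
    refine pvFilter_nil _ ?_
    intro m hm
    by_cases h1 : m ∈ PySem.Set.ofList G <;> by_cases h2 : m ∈ PySem.Set.ofList N <;>
      by_cases h3 : m ∈ PySem.Set.ofList L <;>
      simp_all [List.contains_eq_mem, PySem.Set.contains_eq_listContains, List.mem_filter,
        List.mem_append]
  · rw [List.filter_filter]
    refine List.filter_congr ?_
    intro m hm
    by_cases h1 : m ∈ PySem.Set.ofList G <;> by_cases h2 : m ∈ PySem.Set.ofList N <;>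
      by_cases h3 : m ∈ PySem.Set.ofList L <;>
      simp_all [List.contains_eq_mem, PySem.Set.contains_eq_listContains, List.mem_filter,
        List.mem_append]

lemma pvB2 (G N L : List String) :
    PySem.Set.diff (PySem.Set.inter (PySem.Set.ofList G) (PySem.Set.ofList N)) (PySem.Set.ofList L)
      = pvG (PySem.Set.ofList G) (PySem.Set.ofList N) (PySem.Set.ofList L) true true false
          (PySem.Set.update (PySem.Set.update (PySem.Set.ofList G) N) L) [] := by
  rw [pvG_eq_filter _ _ _ _ _ _ _ [] (pvUNodup G N L) (by simp), List.nil_append,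
    PySem.Set.update_eq_append_filter (PySem.Set.update (PySem.Set.ofList G) N) L,
    PySem.Set.update_eq_append_filter (PySem.Set.ofList G) N, List.filter_append,
    List.filter_append]
  simp only [PySem.Set.inter, PySem.Set.diff]
  refine pvCombine1 ?_ ?_ ?_
  · rw [List.filter_filter]
    refine pvFilter_nil _ ?_
    intro m hm
    by_cases h1 : m ∈ PySem.Set.ofList G <;> by_cases h2 : m ∈ PySem.Set.ofList N <;>
      by_cases h3 : m ∈ PySem.Set.ofList L <;>
      simp_all [List.contains_eq_mem, PySem.Set.contains_eq_listContains, List.mem_filter,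
        List.mem_append]
  · rw [List.filter_filter]
    refine pvFilter_nil _ ?_
    intro m hm
    by_cases h1 : m ∈ PySem.Set.ofList G <;> by_cases h2 : m ∈ PySem.Set.ofList N <;>
      by_cases h3 : m ∈ PySem.Set.ofList L <;>
      simp_all [List.contains_eq_mem, PySem.Set.contains_eq_listContains, List.mem_filter,
        List.mem_append]
  · rw [List.filter_filter]
    refine List.filter_congr ?_
    intro m hm
    by_cases h1 : m ∈ PySem.Set.ofList G <;> by_cases h2 : m ∈ PySem.Set.ofList N <;>
      by_cases h3 : m ∈ PySem.Set.ofList L <;>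
      simp_all [List.contains_eq_mem, PySem.Set.contains_eq_listContains, List.mem_filter,
        List.mem_append]

lemma pvB3 (G N L : List String) :
    PySem.Set.diff (PySem.Set.inter (PySem.Set.ofList G) (PySem.Set.ofList L)) (PySem.Set.ofList N)
      = pvG (PySem.Set.ofList G) (PySem.Set.ofList N) (PySem.Set.ofList L) true false true
          (PySem.Set.update (PySem.Set.update (PySem.Set.ofList G) N) L) [] := by
  rw [pvG_eq_filter _ _ _ _ _ _ _ [] (pvUNodup G N L) (by simp), List.nil_append,
    PySem.Set.update_eq_append_filter (PySem.Set.update (PySem.Set.ofList G) N) L,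
    PySem.Set.update_eq_append_filter (PySem.Set.ofList G) N, List.filter_append,
    List.filter_append]
  simp only [PySem.Set.inter, PySem.Set.diff]
  refine pvCombine1 ?_ ?_ ?_
  · rw [List.filter_filter]
    refine pvFilter_nil _ ?_
    intro m hm
    by_cases h1 : m ∈ PySem.Set.ofList G <;> by_cases h2 : m ∈ PySem.Set.ofList N <;>
      by_cases h3 : m ∈ PySem.Set.ofList L <;>
      simp_all [List.contains_eq_mem, PySem.Set.contains_eq_listContains, List.mem_filter,
        List.mem_append]
  · rw [List.filter_filter]
    refine pvFilter_nil _ ?_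
    intro m hm
    by_cases h1 : m ∈ PySem.Set.ofList G <;> by_cases h2 : m ∈ PySem.Set.ofList N <;>
      by_cases h3 : m ∈ PySem.Set.ofList L <;>
      simp_all [List.contains_eq_mem, PySem.Set.contains_eq_listContains, List.mem_filter,
        List.mem_append]
  · rw [List.filter_filter]
    refine List.filter_congr ?_
    intro m hm
    by_cases h1 : m ∈ PySem.Set.ofList G <;> by_cases h2 : m ∈ PySem.Set.ofList N <;>
      by_cases h3 : m ∈ PySem.Set.ofList L <;>
      simp_all [List.contains_eq_mem, PySem.Set.contains_eq_listContains, List.mem_filter,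
        List.mem_append]

lemma pvB4 (G N L : List String) :
    PySem.Set.diff (PySem.Set.inter (PySem.Set.ofList N) (PySem.Set.ofList L)) (PySem.Set.ofList G)
      = pvG (PySem.Set.ofList G) (PySem.Set.ofList N) (PySem.Set.ofList L) false true true
          (PySem.Set.update (PySem.Set.update (PySem.Set.ofList G) N) L) [] := by
  rw [pvG_eq_filter _ _ _ _ _ _ _ [] (pvUNodup G N L) (by simp), List.nil_append,
    PySem.Set.update_eq_append_filter (PySem.Set.update (PySem.Set.ofList G) N) L,
    PySem.Set.update_eq_append_filter (PySem.Set.ofList G) N, List.filter_append,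
    List.filter_append]
  simp only [PySem.Set.inter, PySem.Set.diff]
  refine pvCombine2 ?_ ?_ ?_
  · refine pvFilter_nil _ ?_
    intro m hm
    by_cases h1 : m ∈ PySem.Set.ofList G <;> by_cases h2 : m ∈ PySem.Set.ofList N <;>
      by_cases h3 : m ∈ PySem.Set.ofList L <;>
      simp_all [List.contains_eq_mem, PySem.Set.contains_eq_listContains, List.mem_filter,
        List.mem_append]
  · rw [List.filter_filter]
    refine pvFilter_nil _ ?_
    intro m hm
    by_cases h1 : m ∈ PySem.Set.ofList G <;> by_cases h2 : m ∈ PySem.Set.ofList N <;>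
      by_cases h3 : m ∈ PySem.Set.ofList L <;>
      simp_all [List.contains_eq_mem, PySem.Set.contains_eq_listContains, List.mem_filter,
        List.mem_append]
  · rw [List.filter_filter, List.filter_filter]
    refine List.filter_congr ?_
    intro m hm
    by_cases h1 : m ∈ PySem.Set.ofList G <;> by_cases h2 : m ∈ PySem.Set.ofList N <;>
      by_cases h3 : m ∈ PySem.Set.ofList L <;>
      simp_all [List.contains_eq_mem, PySem.Set.contains_eq_listContains, List.mem_filter,
        List.mem_append]

lemma pvB5 (G N L : List String) :
    PySem.Set.diff (PySem.Set.diff (PySem.Set.ofList G) (PySem.Set.ofList N)) (PySem.Set.ofList L)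
      = pvG (PySem.Set.ofList G) (PySem.Set.ofList N) (PySem.Set.ofList L) true false false
          (PySem.Set.update (PySem.Set.update (PySem.Set.ofList G) N) L) [] := by
  rw [pvG_eq_filter _ _ _ _ _ _ _ [] (pvUNodup G N L) (by simp), List.nil_append,
    PySem.Set.update_eq_append_filter (PySem.Set.update (PySem.Set.ofList G) N) L,
    PySem.Set.update_eq_append_filter (PySem.Set.ofList G) N, List.filter_append,
    List.filter_append]
  simp only [PySem.Set.inter, PySem.Set.diff]
  refine pvCombine1 ?_ ?_ ?_
  · rw [List.filter_filter]
    refine pvFilter_nil _ ?_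
    intro m hm
    by_cases h1 : m ∈ PySem.Set.ofList G <;> by_cases h2 : m ∈ PySem.Set.ofList N <;>
      by_cases h3 : m ∈ PySem.Set.ofList L <;>
      simp_all [List.contains_eq_mem, PySem.Set.contains_eq_listContains, List.mem_filter,
        List.mem_append]
  · rw [List.filter_filter]
    refine pvFilter_nil _ ?_
    intro m hm
    by_cases h1 : m ∈ PySem.Set.ofList G <;> by_cases h2 : m ∈ PySem.Set.ofList N <;>
      by_cases h3 : m ∈ PySem.Set.ofList L <;>
      simp_all [List.contains_eq_mem, PySem.Set.contains_eq_listContains, List.mem_filter,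
        List.mem_append]
  · rw [List.filter_filter]
    refine List.filter_congr ?_
    intro m hm
    by_cases h1 : m ∈ PySem.Set.ofList G <;> by_cases h2 : m ∈ PySem.Set.ofList N <;>
      by_cases h3 : m ∈ PySem.Set.ofList L <;>
      simp_all [List.contains_eq_mem, PySem.Set.contains_eq_listContains, List.mem_filter,
        List.mem_append]

lemma pvB6 (G N L : List String) :
    PySem.Set.diff (PySem.Set.diff (PySem.Set.ofList N) (PySem.Set.ofList G)) (PySem.Set.ofList L)
      = pvG (PySem.Set.ofList G) (PySem.Set.ofList N) (PySem.Set.ofList L) false true false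
          (PySem.Set.update (PySem.Set.update (PySem.Set.ofList G) N) L) [] := by
  rw [pvG_eq_filter _ _ _ _ _ _ _ [] (pvUNodup G N L) (by simp), List.nil_append,
    PySem.Set.update_eq_append_filter (PySem.Set.update (PySem.Set.ofList G) N) L,
    PySem.Set.update_eq_append_filter (PySem.Set.ofList G) N, List.filter_append,
    List.filter_append]
  simp only [PySem.Set.inter, PySem.Set.diff]
  refine pvCombine2 ?_ ?_ ?_
  · refine pvFilter_nil _ ?_
    intro m hm
    by_cases h1 : m ∈ PySem.Set.ofList G <;> by_cases h2 : m ∈ PySem.Set.ofList N <;>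
      by_cases h3 : m ∈ PySem.Set.ofList L <;>
      simp_all [List.contains_eq_mem, PySem.Set.contains_eq_listContains, List.mem_filter,
        List.mem_append]
  · rw [List.filter_filter]
    refine pvFilter_nil _ ?_
    intro m hm
    by_cases h1 : m ∈ PySem.Set.ofList G <;> by_cases h2 : m ∈ PySem.Set.ofList N <;>
      by_cases h3 : m ∈ PySem.Set.ofList L <;>
      simp_all [List.contains_eq_mem, PySem.Set.contains_eq_listContains, List.mem_filter,
        List.mem_append]
  · rw [List.filter_filter, List.filter_filter]
    refine List.filter_congr ?_
    intro m hm
    by_cases h1 : m ∈ PySem.Set.ofList G <;> by_cases h2 : m ∈ PySem.Set.ofList N <;>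
      by_cases h3 : m ∈ PySem.Set.ofList L <;>
      simp_all [List.contains_eq_mem, PySem.Set.contains_eq_listContains, List.mem_filter,
        List.mem_append]

lemma pvB7 (G N L : List String) :
    PySem.Set.diff (PySem.Set.diff (PySem.Set.ofList L) (PySem.Set.ofList G)) (PySem.Set.ofList N)
      = pvG (PySem.Set.ofList G) (PySem.Set.ofList N) (PySem.Set.ofList L) false false true
          (PySem.Set.update (PySem.Set.update (PySem.Set.ofList G) N) L) [] := by
  rw [pvG_eq_filter _ _ _ _ _ _ _ [] (pvUNodup G N L) (by simp), List.nil_append,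
    PySem.Set.update_eq_append_filter (PySem.Set.update (PySem.Set.ofList G) N) L,
    PySem.Set.update_eq_append_filter (PySem.Set.ofList G) N, List.filter_append,
    List.filter_append]
  simp only [PySem.Set.inter, PySem.Set.diff]
  refine pvCombine3 ?_ ?_ ?_
  · refine pvFilter_nil _ ?_
    intro m hm
    by_cases h1 : m ∈ PySem.Set.ofList G <;> by_cases h2 : m ∈ PySem.Set.ofList N <;>
      by_cases h3 : m ∈ PySem.Set.ofList L <;>
      simp_all [List.contains_eq_mem, PySem.Set.contains_eq_listContains, List.mem_filter,
        List.mem_append]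
  · rw [List.filter_filter]
    refine pvFilter_nil _ ?_
    intro m hm
    by_cases h1 : m ∈ PySem.Set.ofList G <;> by_cases h2 : m ∈ PySem.Set.ofList N <;>
      by_cases h3 : m ∈ PySem.Set.ofList L <;>
      simp_all [List.contains_eq_mem, PySem.Set.contains_eq_listContains, List.mem_filter,
        List.mem_append]
  · rw [List.filter_filter, List.filter_filter]
    refine List.filter_congr ?_
    intro m hm
    by_cases h1 : m ∈ PySem.Set.ofList G <;> by_cases h2 : m ∈ PySem.Set.ofList N <;>
      by_cases h3 : m ∈ PySem.Set.ofList L <;>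
      simp_all [List.contains_eq_mem, PySem.Set.contains_eq_listContains, List.mem_filter,
        List.mem_append]

lemma pvSeven {v1 v2 v3 v4 v5 v6 v7 w1 w2 w3 w4 w5 w6 w7 : List String}
    (h1 : v1 = w1) (h2 : v2 = w2) (h3 : v3 = w3) (h4 : v4 = w4) (h5 : v5 = w5)
    (h6 : v6 = w6) (h7 : v7 = w7) :
    ([("ALL_3", v1), ("GBIF_NCBI", v2), ("GBIF_LOCAL", v3), ("NCBI_LOCAL", v4),
      ("GBIF_ONLY", v5), ("NCBI_ONLY", v6), ("LOCAL_ONLY", v7)] : List (String × List String))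
      = (pvMkD w1 w2 w3 w4 w5 w6 w7).items := by
  subst h1 h2 h3 h4 h5 h6 h7; rfl

lemma pvMemU (G N L : List String) : ∀ m ∈ PySem.Set.update (PySem.Set.update (PySem.Set.ofList G) N) L,
    m ∈ PySem.Set.ofList G ∨ m ∈ PySem.Set.ofList N ∨ m ∈ PySem.Set.ofList L := by
  intro m hm
  rcases (PySem.Set.mem_update _ _ _).1 hm with h | h
  · rcases (PySem.Set.mem_update _ _ _).1 h with h' | h'
    · exact Or.inl h'
    · exact Or.inr (Or.inl ((PySem.Set.mem_ofList _ _).2 h'))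
  · exact Or.inr (Or.inr ((PySem.Set.mem_ofList _ _).2 h))

lemma pvMain (gl nl ll : List String) :
    build_buckets_for_sets gl nl ll = build_buckets_for_sets_alt gl nl ll := by
  simp only [build_buckets_for_sets, build_buckets_for_sets_alt]
  rw [show (PySem.Set.empty : PySem.Set String) = ([] : List String) from rfl]
  simp only [pvCollect_spec, PySem.Set.update_nil_left]
  rw [show pvBuckets0 = pvMkD [] [] [] [] [] [] [] from rfl]
  rw [pvDictFold _ _ _ _ (pvMemU (pvNormList gl) (pvNormList nl) (pvNormList ll))]
  simp only [show ∀ lst, pvNormSet lst = PySem.Set.ofList (pvNormList lst) from fun _ => rfl]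
  generalize pvNormList gl = G
  generalize pvNormList nl = N
  generalize pvNormList ll = L
  exact pvSeven (pvB1 G N L) (pvB2 G N L) (pvB3 G N L) (pvB4 G N L) (pvB5 G N L)
    (pvB6 G N L) (pvB7 G N L)

-- ===== VERDICT (by name: the statement is the Claim_ definition above) =====
theorem build_buckets_for_sets_spec : Claim_equal_build_buckets_for_sets :=
  fun gl nl ll _ => pvMain gl nl ll
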